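-- pv_equiv track=rewrite | github.com/duriantaco/hush2 | src/hush2/commands/export.py | _escape_value
-- ===== SOURCE A (Python) =====
-- def _escape_value(value: str) -> str:
--     special_chars = (" ", '"', "'", "\n", "\\", "$", "`", "#")
--     needs_quoting = False
--     for c in special_chars:
--         if c in value:
--             needs_quoting = True
--             break
--     if not needs_quoting:
--         return value
--     escaped = value.replace("\\", "\\\\")
--     escaped = escaped.replace('"', '\\"')
--     escaped = escaped.replace("\n", "\\n")
--     escaped = escaped.replace("$", "\\$")
--     escaped = escaped.replace("`", "\\`")
--     return f'"{escaped}"'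
-- ===== SOURCE B (Python) =====
-- _ESC = {'\\': '\\\\', '"': '\\"', '\n': '\\n', '$': '\\$', '`': '\\`'}
-- _TRIGGERS = set(' "\'\n\\$`#')
--
-- def _escape_value(value: str) -> str:
--     needs_quoting = False
--     pieces = []
--     for c in value:
--         if c in _TRIGGERS:
--             needs_quoting = True
--         pieces.append(_ESC.get(c, c))
--     if not needs_quoting:
--         return value
--     return '"' + ''.join(pieces) + '"'
-- ===== Notes on version B (the rewrite author's own statement) =====
-- stated objective: alternative
-- what changed: Replaces A's eight whole-string membership scans plus five chained whole-string replace passes with one single pass over the characters that simultaneously detects the trigger characters and maps each character through an escape table.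
import Mathlib
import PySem

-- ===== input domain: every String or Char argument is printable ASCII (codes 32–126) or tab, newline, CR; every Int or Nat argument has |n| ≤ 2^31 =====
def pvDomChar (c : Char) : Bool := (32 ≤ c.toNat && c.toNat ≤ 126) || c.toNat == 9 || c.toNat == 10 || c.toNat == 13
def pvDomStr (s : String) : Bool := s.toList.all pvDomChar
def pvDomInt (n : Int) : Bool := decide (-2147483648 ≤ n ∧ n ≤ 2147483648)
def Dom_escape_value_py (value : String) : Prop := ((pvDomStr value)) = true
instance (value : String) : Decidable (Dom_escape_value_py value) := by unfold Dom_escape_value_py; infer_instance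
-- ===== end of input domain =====

-- B replaces A's eight whole-string membership scans and five chained whole-string
-- replace passes by one single pass over the characters (trigger detection + escape
-- table lookup combined); equal return value on the stated domain.


-- ===== PORT A =====
def escape_value_py (value : String) : String :=
  let special_chars : List String := [" ", "\"", "'", "\n", "\\", "$", "`", "#"]
  -- 'for c in special_chars: if c in value: needs_quoting = True; break'
  let needs_quoting : Bool := special_chars.any (fun c => PySem.Str.isIn c value)
  if !needs_quoting then value
  else
    let e1 := PySem.Str.replace value "\\" "\\\\"
    let e2 := PySem.Str.replace e1 "\"" "\\\""
    let e3 := PySem.Str.replace e2 "\n" "\\n"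
    let e4 := PySem.Str.replace e3 "$" "\\$"
    let e5 := PySem.Str.replace e4 "`" "\\`"
    String.ofList ('"' :: e5.toList ++ ['"'])   -- f'"{escaped}"'

-- ===== PORT B =====
def pvEscDict : PySem.Dict Char (List Char) :=
  PySem.Dict.mk [('\\', ['\\', '\\']), ('"', ['\\', '"']), ('\n', ['\\', 'n']),
                 ('$', ['\\', '$']), ('`', ['\\', '`'])]

def pvTriggers : PySem.Set Char := PySem.Set.ofList [' ', '"', '\'', '\n', '\\', '$', '`', '#']

def escape_value_py_alt (value : String) : String :=
  -- one pass: (needs_quoting flag, accumulated escaped pieces)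
  let r := value.toList.foldl
    (fun (st : Bool × List Char) c =>
      (st.1 || PySem.Set.contains pvTriggers c, st.2 ++ pvEscDict.getD c [c]))
    (false, [])
  if !r.1 then value
  else String.ofList ('"' :: r.2 ++ ['"'])

-- ===== PRECONDITION & SPEC =====
def Spec_escape_value_py (value : String) (out : String) : Prop := out = escape_value_py_alt value
instance (value : String) (out : String) : Decidable (Spec_escape_value_py value out) := by unfold Spec_escape_value_py; infer_instance

-- ===== CLAIM (what is proved, stated in full; the proofs are below) =====
def Claim_equal_escape_value_py : Prop := ∀ (value : String), Dom_escape_value_py value → Spec_escape_value_py value (escape_value_py value)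

-- ===== LEMMAS AND PROOFS =====

-- the per-character escape function B's table computes
def pvEscF (c : Char) : List Char := pvEscDict.getD c [c]

theorem pv_go_single (a : Char) (new : List Char) :
    ∀ (l : List Char) (fuel : Nat) (acc : List Char), l.length ≤ fuel →
      PySem.Chars.replace.go [a] new fuel l acc
        = acc.reverse ++ l.flatMap (fun c => if c = a then new else [c]) := by
  intro l
  induction l with
  | nil => intro fuel acc h; cases fuel <;> simp [PySem.Chars.replace.go]
  | cons c t ih =>
    intro fuel acc h
    cases fuel with
    | zero => simp at h
    | succ n =>
      simp only [PySem.Chars.replace.go]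
      by_cases hc : a = c
      · subst hc
        simp only [List.isPrefixOf, BEq.rfl, Bool.true_and, if_true]
        have hd : List.drop [a].length (a :: t) = t := rfl
        rw [hd, ih _ _ (by simpa using h)]
        simp
      · have hp : List.isPrefixOf [a] (c :: t) = false := by
          simp [List.isPrefixOf, hc]
        rw [hp]
        simp only [Bool.false_eq_true, if_false]
        rw [ih _ _ (by simpa using h)]
        simp [List.flatMap_cons, if_neg (Ne.symm hc)]

theorem pv_replace_single (a : Char) (new s : List Char) :
    PySem.Chars.replace s [a] new = s.flatMap (fun c => if c = a then new else [c]) := by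
  rw [PySem.Chars.replace]
  simp [pv_go_single a new s s.length [] (le_refl _)]

-- the five chained single-character substitutions compose to B's table lookup
theorem pv_compose_esc (c : Char) :
    ((if c = '\\' then ['\\','\\'] else [c]).flatMap (fun x =>
      ((if x = '"' then ['\\','"'] else [x]).flatMap (fun x =>
        ((if x = '\n' then ['\\','n'] else [x]).flatMap (fun x =>
          ((if x = '$' then ['\\','$'] else [x]).flatMap (fun x =>
            if x = '`' then ['\\','`'] else [x])))))))) = pvEscF c := by
  by_cases h1 : c = '\\'; · subst h1; decide
  by_cases h2 : c = '"';  · subst h2; decide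
  by_cases h3 : c = '\n'; · subst h3; decide
  by_cases h4 : c = '$';  · subst h4; decide
  by_cases h5 : c = '`';  · subst h5; decide
  simp [if_neg h1, if_neg h2, if_neg h3, if_neg h4, if_neg h5,
        pvEscF, pvEscDict, PySem.Dict.getD, PySem.Dict.get?,
        Ne.symm h1, Ne.symm h2, Ne.symm h3, Ne.symm h4, Ne.symm h5]

-- B's fold computes (any trigger, flatMap of the escape table)
theorem pv_foldl_char (l : List Char) (b : Bool) (acc : List Char) :
    l.foldl (fun (st : Bool × List Char) c =>
        (st.1 || PySem.Set.contains pvTriggers c, st.2 ++ pvEscDict.getD c [c])) (b, acc)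
      = (b || l.any (fun c => PySem.Set.contains pvTriggers c), acc ++ l.flatMap pvEscF) := by
  induction l generalizing b acc with
  | nil => simp
  | cons c t ih =>
    rw [List.foldl_cons, ih]
    simp [Bool.or_assoc, List.append_assoc, pvEscF]

-- A's eight substring scans agree with B's per-character trigger test
theorem pv_needs_eq (l : List Char) :
    ([" ", "\"", "'", "\n", "\\", "$", "`", "#"] : List String).any
        (fun c => PySem.Chars.isIn c.toList l)
      = l.any (fun c => PySem.Set.contains pvTriggers c) := by
  have mem_iff : ∀ a : Char, PySem.Chars.isIn [a] l = true ↔ a ∈ l := fun a =>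
    (PySem.Chars.isIn_iff_infix [a] l).trans (List.singleton_infix_iff a l)
  rw [Bool.eq_iff_iff]
  simp only [List.any_cons, List.any_nil, Bool.or_eq_true, Bool.false_eq_true, or_false,
             List.any_eq_true]
  rw [show (" ".toList) = [' '] from rfl, show ("\"".toList) = ['"'] from rfl,
      show ("'".toList) = ['\''] from rfl, show ("\n".toList) = ['\n'] from rfl,
      show ("\\".toList) = ['\\'] from rfl, show ("$".toList) = ['$'] from rfl,
      show ("`".toList) = ['`'] from rfl, show ("#".toList) = ['#'] from rfl]
  simp only [mem_iff]
  constructor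
  · rintro (h|h|h|h|h|h|h|h) <;> exact ⟨_, h, by decide⟩
  · rintro ⟨c, hc, ht⟩
    have hm : c ∈ [' ', '"', '\'', '\n', '\\', '$', '`', '#'] := by
      simpa [pvTriggers, PySem.Set.contains_iff, PySem.Set.mem_ofList] using ht
    simp only [List.mem_cons, List.not_mem_nil, or_false] at hm
    rcases hm with rfl|rfl|rfl|rfl|rfl|rfl|rfl|rfl <;> tauto

theorem pv_escaped_eq (l : List Char) :
    PySem.Chars.replace (PySem.Chars.replace (PySem.Chars.replace (PySem.Chars.replace
      (PySem.Chars.replace l ['\\'] ['\\','\\']) ['"'] ['\\','"']) ['\n'] ['\\','n'])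
      ['$'] ['\\','$']) ['`'] ['\\','`'] = l.flatMap pvEscF := by
  rw [pv_replace_single, pv_replace_single, pv_replace_single, pv_replace_single,
      pv_replace_single, List.flatMap_assoc, List.flatMap_assoc, List.flatMap_assoc,
      List.flatMap_assoc]
  refine List.flatMap_congr ?_
  intro c _
  exact pv_compose_esc c

theorem pv_B_char (value : String) :
    escape_value_py_alt value =
      if value.toList.any (fun c => PySem.Set.contains pvTriggers c)
      then String.ofList ('"' :: value.toList.flatMap pvEscF ++ ['"']) else value := by
  unfold escape_value_py_alt
  rw [pv_foldl_char]
  by_cases hq : value.toList.any (fun c => PySem.Set.contains pvTriggers c) = true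
  · simp only [Bool.false_or, List.nil_append, hq, Bool.not_true, Bool.false_eq_true,
               if_false, if_true]
  · have h' : value.toList.any (fun c => PySem.Set.contains pvTriggers c) = false := by
      simpa using hq
    simp only [Bool.false_or, List.nil_append, h', Bool.not_false, if_true,
               Bool.false_eq_true, if_false]

theorem pv_A_char (value : String) :
    escape_value_py value =
      if value.toList.any (fun c => PySem.Set.contains pvTriggers c)
      then String.ofList ('"' :: value.toList.flatMap pvEscF ++ ['"']) else value := by
  unfold escape_value_py
  have hne : (([" ", "\"", "'", "\n", "\\", "$", "`", "#"] : List String).any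
      (fun c => PySem.Str.isIn c value))
      = value.toList.any (fun c => PySem.Set.contains pvTriggers c) := by
    simpa [PySem.Str.isIn] using pv_needs_eq value.toList
  simp only [hne]
  by_cases hq : value.toList.any (fun c => PySem.Set.contains pvTriggers c) = true
  · simp only [hq, Bool.not_true, Bool.false_eq_true, if_false, if_true]
    have h5 : (PySem.Str.replace (PySem.Str.replace (PySem.Str.replace (PySem.Str.replace
        (PySem.Str.replace value "\\" "\\\\") "\"" "\\\"") "\n" "\\n") "$" "\\$") "`" "\\`").toList
        = value.toList.flatMap pvEscF := by
      simp only [PySem.Str.toList_replace]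
      rw [show ("\\" : String).toList = ['\\'] from rfl,
          show ("\\\\" : String).toList = ['\\','\\'] from rfl,
          show ("\"" : String).toList = ['"'] from rfl,
          show ("\\\"" : String).toList = ['\\','"'] from rfl,
          show ("\n" : String).toList = ['\n'] from rfl,
          show ("\\n" : String).toList = ['\\','n'] from rfl,
          show ("$" : String).toList = ['$'] from rfl,
          show ("\\$" : String).toList = ['\\','$'] from rfl,
          show ("`" : String).toList = ['`'] from rfl,
          show ("\\`" : String).toList = ['\\','`'] from rfl]
      exact pv_escaped_eq value.toList
    rw [h5]
  · have h' : value.toList.any (fun c => PySem.Set.contains pvTriggers c) = false := by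
      simpa using hq
    simp only [h', Bool.not_false, if_true, Bool.false_eq_true, if_false]

theorem escape_value_py_spec : Claim_equal_escape_value_py := by
  intro value _
  unfold Spec_escape_value_py
  rw [pv_A_char, pv_B_char]
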